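-- pv_equiv track=rewrite | github.com/codetiger/MS-DDQN-2048 | supervisor.py | to_c_board
-- ===== SOURCE A (Python) =====
-- def to_c_board(m):
-- 	board = 0
-- 	i = 0
-- 	for row in m:
-- 		for c in row:
-- 			board |= c << (4*i)
-- 			i += 1
-- 	return board
-- ===== SOURCE B (Python) =====
-- def to_c_board(m):
--     cells = [c for row in m for c in row]
--     board = 0
--     for c in reversed(cells):
--         board = (board << 4) | c
--     return board
-- ===== Notes on version B (the rewrite author's own statement) =====
-- stated objective: alternative
-- what changed: Replaces the indexed nested loop (board |= c << 4*i with a running cell counter) by flattening the board and folding the flat cells in reverse with Horner-style shift-accumulate board = (board << 4) | c, eliminating the index and the growing per-cell shift.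
import Mathlib
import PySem

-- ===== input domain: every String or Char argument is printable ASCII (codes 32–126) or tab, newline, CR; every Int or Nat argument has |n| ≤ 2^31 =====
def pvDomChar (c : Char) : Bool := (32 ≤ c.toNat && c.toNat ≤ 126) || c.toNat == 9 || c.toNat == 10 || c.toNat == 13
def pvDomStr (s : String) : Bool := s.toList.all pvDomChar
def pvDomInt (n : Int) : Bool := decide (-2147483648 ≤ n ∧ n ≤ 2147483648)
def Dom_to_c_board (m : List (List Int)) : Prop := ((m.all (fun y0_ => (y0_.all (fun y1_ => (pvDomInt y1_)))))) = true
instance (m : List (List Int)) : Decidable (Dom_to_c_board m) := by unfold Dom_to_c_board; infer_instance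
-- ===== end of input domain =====

-- B replaces A's indexed nested loop by a reverse Horner fold over the flattened cells (alternative decomposition, same cost).

-- ===== PORT A =====
-- nested for-loops with state (board, i); 'board |= c << (4*i); i += 1'
def to_c_board (m : List (List Int)) : Int :=
  (m.foldl
    (fun (s : Int × Nat) row =>
      row.foldl (fun (s : Int × Nat) (c : Int) => (PySem.Int.bor s.1 (c <<< ((4 : Nat) * s.2)), s.2 + 1)) s)
    (0, 0)).1

-- ===== PORT B =====
-- cells = [c for row in m for c in row]; then fold reversed(cells) with board = (board << 4) | c
def to_c_board_alt (m : List (List Int)) : Int :=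
  let cells := m.flatMap (fun row => row)
  cells.reverse.foldl (fun (board c : Int) => PySem.Int.bor (board <<< (4 : Nat)) c) 0

-- ===== PRECONDITION & SPEC =====
def Spec_to_c_board (m : List (List Int)) (out : Int) : Prop := out = to_c_board_alt m
instance (m : List (List Int)) (out : Int) : Decidable (Spec_to_c_board m out) := by unfold Spec_to_c_board; infer_instance

-- ===== CLAIM (what is proved, stated in full; the proofs are below) =====
def Claim_equal_to_c_board : Prop := ∀ (m : List (List Int)), Dom_to_c_board m → Spec_to_c_board m (to_c_board m)

-- ===== LEMMAS AND PROOFS =====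

-- Nat: or of bit-disjoint numbers is their sum
theorem nat_mod_two_eq_ite_testBit (a : Nat) :
    a % 2 = cond (a.testBit 0) 1 0 := by
  rw [Nat.testBit_zero]
  rcases Nat.mod_two_eq_zero_or_one a with h | h <;> simp [h]

theorem nat_disj_or_eq_add (a : Nat) : ∀ b : Nat, a &&& b = 0 → a ||| b = a + b := by
  induction a using Nat.div2Induction with
  | _ a ih =>
    intro b h
    rcases Nat.eq_zero_or_pos a with ha | ha
    · simp [ha]
    have h2 : a / 2 &&& b / 2 = 0 := by rw [← Nat.and_div_two, h]
    have ih2 := ih ha (b / 2) h2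
    have hand0 : (a &&& b).testBit 0 = false := by simp [h]
    have ht : (a.testBit 0 && b.testBit 0) = false := by rw [← Nat.testBit_and]; exact hand0
    have hor0 : (a ||| b).testBit 0 = (a.testBit 0 || b.testBit 0) := Nat.testBit_or ..
    have ma := nat_mod_two_eq_ite_testBit a
    have mb := nat_mod_two_eq_ite_testBit b
    have mo := nat_mod_two_eq_ite_testBit (a ||| b)
    rw [hor0] at mo
    have hm : (a ||| b) % 2 = a % 2 + b % 2 := by
      cases ha1 : a.testBit 0 <;> cases hb1 : b.testBit 0
      · simp only [ha1, hb1, Bool.cond_false, Bool.or_false] at ma mb mo; omega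
      · simp only [ha1, hb1, Bool.cond_false, Bool.cond_true, Bool.or_true] at ma mb mo; omega
      · simp only [ha1, hb1, Bool.cond_false, Bool.cond_true, Bool.true_or] at ma mb mo; omega
      · simp only [ha1, hb1] at ht; simp at ht
    have hdo : (a ||| b) = 2 * ((a ||| b) / 2) + (a ||| b) % 2 := by omega
    have hoq : (a ||| b) / 2 = a / 2 ||| b / 2 := Nat.or_div_two
    omega

theorem nat_ldiff_add_and (m n : Nat) : m.ldiff n + (m &&& n) = m := by
  have hd : (m.ldiff n) &&& (m &&& n) = 0 := by
    apply Nat.eq_of_testBit_eq; intro i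
    simp only [Nat.testBit_and, Nat.testBit_ldiff, Nat.zero_testBit]
    cases m.testBit i <;> cases n.testBit i <;> simp
  have ho : (m.ldiff n) ||| (m &&& n) = m := by
    apply Nat.eq_of_testBit_eq; intro i
    simp only [Nat.testBit_or, Nat.testBit_and, Nat.testBit_ldiff]
    cases m.testBit i <;> cases n.testBit i <;> simp
  rw [← nat_disj_or_eq_add _ _ hd, ho]

-- Int extensionality by testBit
theorem int_eq_of_testBit_eq (a b : Int) (h : ∀ k, a.testBit k = b.testBit k) : a = b := by
  cases a with
  | ofNat m =>
    cases b with
    | ofNat n =>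
      congr 1
      apply Nat.eq_of_testBit_eq
      intro i; simpa [Int.testBit] using h i
    | negSucc n =>
      exfalso
      have hk := h (m + n)
      have h1 : m < 2 ^ (m + n) := lt_of_lt_of_le (Nat.lt_two_pow_self) (Nat.pow_le_pow_right (by norm_num) (by omega))
      have h2 : n < 2 ^ (m + n) := lt_of_lt_of_le (Nat.lt_two_pow_self) (Nat.pow_le_pow_right (by norm_num) (by omega))
      simp [Int.testBit, Nat.testBit_lt_two_pow h1, Nat.testBit_lt_two_pow h2] at hk
  | negSucc m =>
    cases b with
    | ofNat n =>
      exfalso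
      have hk := h (m + n)
      have h1 : m < 2 ^ (m + n) := lt_of_lt_of_le (Nat.lt_two_pow_self) (Nat.pow_le_pow_right (by norm_num) (by omega))
      have h2 : n < 2 ^ (m + n) := lt_of_lt_of_le (Nat.lt_two_pow_self) (Nat.pow_le_pow_right (by norm_num) (by omega))
      simp [Int.testBit, Nat.testBit_lt_two_pow h1, Nat.testBit_lt_two_pow h2] at hk
    | negSucc n =>
      congr 1
      apply Nat.eq_of_testBit_eq
      intro i
      have := h i
      simpa [Int.testBit] using this

-- PySem's Python '|' agrees with Mathlib's Int.lor
theorem bor_eq_lor (a b : Int) : PySem.Int.bor a b = Int.lor a b := by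
  unfold PySem.Int.bor
  cases a with
  | ofNat m =>
    cases b with
    | ofNat n => simp [Int.lor]
    | negSucc n =>
      have := nat_ldiff_add_and n m
      simp [Int.lor]; omega
  | negSucc m =>
    cases b with
    | ofNat n =>
      have := nat_ldiff_add_and m n
      simp [Int.lor]; omega
    | negSucc n => simp [Int.lor]; omega

theorem nat_testBit_shiftLeft_sub_one (x s j : Nat) (hx : 0 < x) :
    (x <<< s - 1).testBit j = (decide (j < s) || (x - 1).testBit (j - s)) := by
  have hdisj : ((x - 1) <<< s) &&& (2 ^ s - 1) = 0 := by
    apply Nat.eq_of_testBit_eq; intro i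
    simp [Nat.testBit_shiftLeft]
    intro h1 h2; omega
  have hrepr : x <<< s - 1 = ((x - 1) <<< s) ||| (2 ^ s - 1) := by
    rw [nat_disj_or_eq_add _ _ hdisj, Nat.shiftLeft_eq, Nat.shiftLeft_eq]
    have hp : 0 < 2 ^ s := Nat.two_pow_pos s
    have : x * 2 ^ s = (x - 1) * 2 ^ s + 2 ^ s := by
      have hx1 : x = (x - 1) + 1 := by omega
      calc x * 2 ^ s = ((x - 1) + 1) * 2 ^ s := by rw [← hx1]
        _ = (x - 1) * 2 ^ s + 2 ^ s := by ring
    omega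
  rw [hrepr]
  simp [Nat.testBit_or, Nat.testBit_shiftLeft, Nat.testBit_two_pow_sub_one]
  rcases Nat.lt_or_ge j s with h | h
  · simp [h, Nat.not_le.mpr h]
  · simp [Nat.not_lt.mpr h, h]

theorem int_testBit_shiftLeft (a : Int) (s j : Nat) :
    (a <<< s).testBit j = (decide (s ≤ j) && a.testBit (j - s)) := by
  cases a with
  | ofNat m =>
    show (Int.ofNat (m <<< s)).testBit j = _
    simp [Int.testBit, Nat.testBit_shiftLeft]
  | negSucc m =>
    show (Int.negSucc ((m + 1) <<< s - 1)).testBit j = _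
    simp only [Int.testBit, nat_testBit_shiftLeft_sub_one (m + 1) s j (by omega)]
    rcases Nat.lt_or_ge j s with h | h
    · simp [h, Nat.not_le.mpr h]
    · simp [Nat.not_lt.mpr h, h]

-- bor algebra needed for the fold proofs
theorem int_zero_testBit (k : Nat) : (0 : Int).testBit k = false := by
  show (Int.ofNat 0).testBit k = false
  simp [Int.testBit]
theorem zero_bor' (a : Int) : PySem.Int.bor 0 a = a := by
  apply int_eq_of_testBit_eq; intro k
  rw [bor_eq_lor]; simp [Int.testBit_lor, int_zero_testBit]

theorem bor_assoc' (a b c : Int) :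
    PySem.Int.bor (PySem.Int.bor a b) c = PySem.Int.bor a (PySem.Int.bor b c) := by
  apply int_eq_of_testBit_eq; intro k
  simp only [bor_eq_lor, Int.testBit_lor, Bool.or_assoc]

theorem bor_comm' (a b : Int) : PySem.Int.bor a b = PySem.Int.bor b a := by
  apply int_eq_of_testBit_eq; intro k
  simp only [bor_eq_lor, Int.testBit_lor, Bool.or_comm]

theorem bor_shiftLeft (a b : Int) (s : Nat) :
    (PySem.Int.bor a b) <<< s = PySem.Int.bor (a <<< s) (b <<< s) := by
  apply int_eq_of_testBit_eq; intro k
  simp only [bor_eq_lor, int_testBit_shiftLeft, Int.testBit_lor]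
  cases decide (s ≤ k) <;> simp

theorem int_shiftLeft_zero (a : Int) : a <<< (0 : Nat) = a := by
  apply int_eq_of_testBit_eq; intro k
  simp

-- pack = B's Horner fold, in foldr form
def pvPack (l : List Int) : Int :=
  l.foldr (fun (c b : Int) => PySem.Int.bor (b <<< (4 : Nat)) c) 0

theorem alt_eq_pack (m : List (List Int)) :
    to_c_board_alt m = pvPack (m.flatMap (fun row => row)) := by
  unfold to_c_board_alt pvPack
  rw [List.foldl_reverse]

theorem pack_append (r s : List Int) :
    pvPack (r ++ s) = PySem.Int.bor (pvPack s <<< ((4 : Nat) * r.length)) (pvPack r) := by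
  induction r with
  | nil =>
    simp [pvPack]
  | cons c t ih =>
    show PySem.Int.bor (pvPack (t ++ s) <<< (4 : Nat)) c = _
    rw [ih, bor_shiftLeft]
    have hs : (pvPack s <<< ((4 : Nat) * t.length)) <<< (4 : Nat) = pvPack s <<< ((4 : Nat) * (c :: t).length) := by
      rw [← Int.shiftLeft_add]
      have hlen : (4 : Nat) * t.length + 4 = (4 : Nat) * (c :: t).length := by
        simp only [List.length_cons]; omega
      rw [hlen]
    rw [hs, bor_assoc']
    rfl

-- A's inner loop over one row, from an arbitrary (board, i) state
theorem inner_loop (row : List Int) : ∀ (b : Int) (i : Nat),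
    row.foldl (fun (s : Int × Nat) (c : Int) => (PySem.Int.bor s.1 (c <<< ((4 : Nat) * s.2)), s.2 + 1)) (b, i)
      = (PySem.Int.bor b (pvPack row <<< ((4 : Nat) * i)), i + row.length) := by
  induction row with
  | nil => intro b i; simp [pvPack]
  | cons c t ih =>
    intro b i
    simp only [List.foldl_cons, ih]
    refine Prod.ext ?_ ?_
    · show PySem.Int.bor (PySem.Int.bor b (c <<< ((4 : Nat) * i))) (pvPack t <<< ((4 : Nat) * (i + 1)))
          = PySem.Int.bor b (pvPack (c :: t) <<< ((4 : Nat) * i))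
      have hp : pvPack (c :: t) = PySem.Int.bor (pvPack t <<< (4 : Nat)) c := rfl
      rw [hp, bor_shiftLeft, bor_assoc']
      congr 1
      rw [bor_comm']
      congr 1
      rw [← Int.shiftLeft_add]
      congr 1
      omega
    · simp [List.length_cons]; omega

-- A's outer loop over the rows
theorem outer_loop (m : List (List Int)) : ∀ (b : Int) (i : Nat),
    m.foldl
      (fun (s : Int × Nat) row =>
        row.foldl (fun (s : Int × Nat) (c : Int) => (PySem.Int.bor s.1 (c <<< ((4 : Nat) * s.2)), s.2 + 1)) s)
      (b, i)
      = (PySem.Int.bor b (pvPack (m.flatMap (fun row => row)) <<< ((4 : Nat) * i)),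
         i + (m.flatMap (fun row => row)).length) := by
  induction m with
  | nil => intro b i; simp [pvPack]
  | cons r t ih =>
    intro b i
    simp only [List.foldl_cons, inner_loop, ih]
    refine Prod.ext ?_ ?_
    · show PySem.Int.bor (PySem.Int.bor b (pvPack r <<< ((4 : Nat) * i)))
            (pvPack (t.flatMap (fun row => row)) <<< ((4 : Nat) * (i + r.length)))
          = PySem.Int.bor b (pvPack ((r :: t).flatMap (fun row => row)) <<< ((4 : Nat) * i))
      have hf : (r :: t).flatMap (fun row => row) = r ++ t.flatMap (fun row => row) := by
        simp [List.flatMap_cons]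
      rw [hf, pack_append, bor_shiftLeft, bor_assoc']
      congr 1
      rw [bor_comm']
      congr 1
      rw [← Int.shiftLeft_add]
      congr 1
      ring
    · simp [List.flatMap_cons]; omega

-- ===== VERDICT (by name: the statement is the Claim_ definition above) =====
theorem to_c_board_spec : Claim_equal_to_c_board := by
  intro m _
  unfold Spec_to_c_board
  rw [alt_eq_pack]
  unfold to_c_board
  rw [outer_loop]
  rw [int_shiftLeft_zero, zero_bor']
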